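-- pv_equiv track=rewrite | github.com/liedengshangdeng/- | 溜溜梅.py | split_string_into_lists
-- ===== SOURCE A (Python) =====
-- def split_string_into_lists(input_string):
--     split_strings = input_string.split('@@')
--     ask = []
--     answer = []
--     for i, text in enumerate(split_strings):
--         if i % 2 == 0:
--             ask.append(text.strip())
--         else:
--             answer.append(text.strip())
--     return ask, answer
-- ===== SOURCE B (Python) =====
-- def split_string_into_lists(input_string):
--     pieces = input_string.split('@@')
--     return [p.strip() for p in pieces[::2]], [p.strip() for p in pieces[1::2]]
-- ===== Notes on version B (the rewrite author's own statement) =====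
-- stated objective: idiomatic
-- what changed: Replaces the single enumerate loop with an index-parity branch by slicing the split pieces into even- and odd-indexed subsequences (pieces[::2], pieces[1::2]) and stripping each via comprehensions.
import Mathlib
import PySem

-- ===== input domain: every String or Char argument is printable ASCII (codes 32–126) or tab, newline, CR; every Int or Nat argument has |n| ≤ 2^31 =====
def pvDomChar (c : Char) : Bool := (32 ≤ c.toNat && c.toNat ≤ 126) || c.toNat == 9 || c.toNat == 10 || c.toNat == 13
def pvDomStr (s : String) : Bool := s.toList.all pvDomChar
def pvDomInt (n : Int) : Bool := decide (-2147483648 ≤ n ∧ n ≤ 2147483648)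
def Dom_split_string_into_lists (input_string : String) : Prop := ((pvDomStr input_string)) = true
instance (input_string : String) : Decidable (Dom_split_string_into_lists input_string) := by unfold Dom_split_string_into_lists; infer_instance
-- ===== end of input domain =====

-- B replaces A's enumerate loop with an index-parity branch by the even/odd stride slices
-- pieces[::2] / pieces[1::2], each stripped by a map; same cost, more idiomatic.

-- ===== PORT A =====
def split_string_into_lists (input_string : String) : List String × List String :=
  let split_strings := (PySem.Str.split? input_string "@@").getD []
  (PySem.List.enumerate split_strings).foldl
    (fun acc p =>
      if PySem.Int.mod p.1 2 == 0 then (acc.1 ++ [PySem.Str.strip p.2], acc.2)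
      else (acc.1, acc.2 ++ [PySem.Str.strip p.2]))
    ([], [])

-- ===== PORT B =====
def split_string_into_lists_alt (input_string : String) : List String × List String :=
  let pieces := (PySem.Str.split? input_string "@@").getD []
  (((PySem.List.slice? pieces none none 2).getD []).map PySem.Str.strip,
   ((PySem.List.slice? pieces (some 1) none 2).getD []).map PySem.Str.strip)

-- ===== PRECONDITION & SPEC =====
def Spec_split_string_into_lists (input_string : String) (out : List String × List String) : Prop := out = split_string_into_lists_alt input_string
instance (input_string : String) (out : List String × List String) : Decidable (Spec_split_string_into_lists input_string out) := by unfold Spec_split_string_into_lists; infer_instance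

-- ===== CLAIM (what is proved, stated in full; the proofs are below) =====
def Claim_equal_split_string_into_lists : Prop := ∀ (input_string : String), Dom_split_string_into_lists input_string → Spec_split_string_into_lists input_string (split_string_into_lists input_string)

-- ===== LEMMAS AND PROOFS =====

-- even-indexed elements of a list
def pvEvens {α : Type} : List α → List α
  | [] => []
  | [x] => [x]
  | x :: _ :: rest => x :: pvEvens rest

theorem pvEvens_cons {α : Type} (x : α) (t : List α) : pvEvens (x :: t) = x :: pvEvens t.tail := by
  cases t <;> rfl

theorem core {α : Type} (l : List α) :
    List.filterMap (fun k : Nat => l[2*k]?) (List.range ((l.length+1)/2)) = pvEvens l := by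
  induction l using pvEvens.induct with
  | case1 => simp [pvEvens]
  | case2 x => simp [pvEvens, List.range_succ]
  | case3 x y rest ih =>
    have hlen : ((x :: y :: rest).length + 1) / 2 = (rest.length + 1) / 2 + 1 := by
      simp [List.length_cons]; omega
    rw [hlen, List.range_succ_eq_map, List.filterMap_cons]
    simp only [List.filterMap_map]
    have : (fun k : Nat => (x :: y :: rest)[2*(k+1)]?) = (fun k : Nat => rest[2*k]?) := by
      funext k
      have h2 : 2*(k+1) = 2*k + 1 + 1 := by omega
      simp [h2]
    simp only [Function.comp_def, Nat.succ_eq_add_one]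
    rw [show (fun k : Nat => (x :: y :: rest)[2*(k+1)]?) = (fun k : Nat => rest[2*k]?) from this]
    simp [pvEvens, ih]

theorem slice_even {α : Type} (l : List α) :
    (PySem.List.slice? l none none 2).getD [] = pvEvens l := by
  simp only [PySem.List.slice?, PySem.List.sliceIndices]
  norm_num
  have hc : (if 0 < l.length then (((l.length : Int) + 2 - 1) / 2).toNat else 0) = (l.length + 1)/2 := by
    split <;> omega
  rw [hc]
  have hf : (fun x : Nat => l[(2 * (x:Int)).toNat]?) = (fun k : Nat => l[2*k]?) := by
    funext k
    have h2 : (2*(k:Int)).toNat = 2*k := by omega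
    rw [h2]
  rw [hf]
  exact core l

theorem slice_odd {α : Type} (l : List α) :
    (PySem.List.slice? l (some 1) none 2).getD [] = pvEvens l.tail := by
  simp only [PySem.List.slice?, PySem.List.sliceIndices]
  cases l with
  | nil => rfl
  | cons x t =>
    norm_num
    have hc : (if 0 < t.length then (((t.length:Int) + 2 - 1) / 2).toNat else 0) = (t.length + 1)/2 := by
      split <;> omega
    rw [hc]
    have hf : (fun k : Nat => (x :: t)[(1 + 2 * (k:Int)).toNat]?) = (fun k : Nat => t[2*k]?) := by
      funext k
      have : ((1:Int) + 2 * k).toNat = 2*k + 1 := by omega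
      simp [this]
    rw [hf]
    exact core t

theorem fold_spec (l : List String) (k : Int) (hk : 0 ≤ k) (a b : List String) :
    (PySem.List.enumerate l k).foldl
      (fun acc p =>
        if PySem.Int.mod p.1 2 == 0 then (acc.1 ++ [PySem.Str.strip p.2], acc.2)
        else (acc.1, acc.2 ++ [PySem.Str.strip p.2]))
      (a, b)
    = if PySem.Int.mod k 2 == 0 then
        (a ++ (pvEvens l).map PySem.Str.strip, b ++ (pvEvens l.tail).map PySem.Str.strip)
      else
        (a ++ (pvEvens l.tail).map PySem.Str.strip, b ++ (pvEvens l).map PySem.Str.strip) := by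
  induction l generalizing k a b with
  | nil => simp [PySem.List.enumerate, pvEvens]
  | cons x t ih =>
    have henum : PySem.List.enumerate (x :: t) k = (k, x) :: PySem.List.enumerate t (k+1) := rfl
    rw [henum, List.foldl_cons]
    have hmod : PySem.Int.mod k 2 = k % 2 := PySem.Int.mod_eq_emod_of_pos (by omega)
    have hmod1 : PySem.Int.mod (k+1) 2 = (k+1) % 2 := PySem.Int.mod_eq_emod_of_pos (by omega)
    rcases Int.emod_two_eq k with h | h
    · have h1 : (k+1) % 2 = 1 := by omega
      simp only [hmod, h]
      rw [if_pos (by decide)]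
      rw [ih (k+1) (by omega)]
      simp only [hmod1, h1]
      rw [if_neg (by decide)]
      simp [pvEvens_cons]
    · have h1 : (k+1) % 2 = 0 := by omega
      simp only [hmod, h]
      rw [if_neg (by decide)]
      rw [ih (k+1) (by omega)]
      simp only [hmod1, h1]
      rw [if_pos (by decide)]
      simp [pvEvens_cons]

-- ===== VERDICT (by name: the statement is the Claim_ definition above) =====
theorem split_string_into_lists_spec : Claim_equal_split_string_into_lists := by
  intro s _
  unfold Spec_split_string_into_lists split_string_into_lists split_string_into_lists_alt
  simp only [slice_even, slice_odd]
  rw [fold_spec _ 0 le_rfl]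
  simp [PySem.Int.mod]
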